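-- pv_equiv track=rewrite | github.com/BuonHobo/advent-of-code | _2015/5/Rainer/first.py | thirdCondition
-- ===== SOURCE A (Python) =====
-- def thirdCondition(niceString):
--     if niceString == "" or len(niceString) < 2:
--         return False
--     else:
--         i = 1
--         stillNotFound = True
--         while i < len(niceString) and stillNotFound:
--             if (niceString[i - 1],niceString[i]) in {('a','b'),('c','d'),('p','q'),('x','y')}:
--                 stillNotFound = False
--             i += 1
--         return stillNotFound
-- ===== SOURCE B (Python) =====
-- def thirdCondition(niceString):
--     return len(niceString) >= 2 and not any(
--         p in niceString for p in ("ab", "cd", "pq", "xy"))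
-- ===== Notes on version B (the rewrite author's own statement) =====
-- stated objective: idiomatic
-- what changed: Replaces the positional while-loop with an early-exit flag testing adjacent character tuples against a set by a length guard plus a disjunction of four substring-membership tests.
import Mathlib
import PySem

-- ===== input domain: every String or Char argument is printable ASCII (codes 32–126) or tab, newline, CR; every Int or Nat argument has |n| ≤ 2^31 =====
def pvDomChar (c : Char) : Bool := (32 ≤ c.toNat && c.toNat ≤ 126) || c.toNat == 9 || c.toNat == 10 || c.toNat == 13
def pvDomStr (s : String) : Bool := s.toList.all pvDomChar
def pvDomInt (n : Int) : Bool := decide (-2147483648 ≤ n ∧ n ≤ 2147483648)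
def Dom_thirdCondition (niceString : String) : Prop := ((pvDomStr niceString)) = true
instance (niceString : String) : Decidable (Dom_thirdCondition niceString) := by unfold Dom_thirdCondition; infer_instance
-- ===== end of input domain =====

-- B replaces A's positional while-loop-with-flag over adjacent character pairs by a
-- length guard plus a disjunction of four substring-membership tests (idiomatic; same cost).


-- ===== PORT A =====
-- the forbidden-pair set literal of A
def pvForbidden : List (Char × Char) := [('a','b'),('c','d'),('p','q'),('x','y')]

-- the while loop of A: index i and the stillNotFound flag; loop while i < len and stillNotFound
def thirdLoopA (cs : List Char) (i : Nat) (still : Bool) : Bool :=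
  if i < cs.length ∧ still = true then
    thirdLoopA cs (i + 1)
      (if (cs.getD (i - 1) ' ', cs.getD i ' ') ∈ pvForbidden then false else still)
  else still
termination_by cs.length - i
decreasing_by omega

def thirdCondition (niceString : String) : Bool :=
  if niceString = "" ∨ niceString.toList.length < 2 then false
  else thirdLoopA niceString.toList 1 true

-- ===== PORT B =====
def thirdCondition_alt (niceString : String) : Bool :=
  decide (PySem.Str.len niceString ≥ 2) &&
    !(["ab", "cd", "pq", "xy"].any (fun p => PySem.Str.isIn p niceString))

-- ===== PRECONDITION & SPEC =====
def Spec_thirdCondition (niceString : String) (out : Bool) : Prop := out = thirdCondition_alt niceString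
instance (niceString : String) (out : Bool) : Decidable (Spec_thirdCondition niceString out) := by unfold Spec_thirdCondition; infer_instance

-- ===== CLAIM (what is proved, stated in full; the proofs are below) =====
def Claim_equal_thirdCondition : Prop := ∀ (niceString : String), Dom_thirdCondition niceString → Spec_thirdCondition niceString (thirdCondition niceString)

-- ===== LEMMAS AND PROOFS =====

-- a two-char list is an infix iff its pair occurs among the adjacent pairs
theorem infix_pair_iff_mem_zip (a b : Char) (cs : List Char) :
    [a, b] <:+: cs ↔ (a, b) ∈ cs.zip cs.tail := by
  induction cs with
  | nil => simp
  | cons c cs ih =>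
    rw [List.infix_cons_iff]
    cases cs with
    | nil =>
      constructor
      · rintro (⟨t, ht⟩ | h)
        · simp [List.cons.injEq] at ht
        · simp at h
      · intro h; simp at h
    | cons d ds =>
      constructor
      · rintro (⟨t, ht⟩ | h)
        · simp only [List.cons_append, List.cons.injEq] at ht
          obtain ⟨rfl, hbd, -⟩ := ht
          simp [hbd.symm]
        · have := ih.mp h
          simp only [List.tail_cons, List.zip_cons_cons, List.mem_cons]
          right
          simpa using this
      · intro h
        simp only [List.tail_cons, List.zip_cons_cons, List.mem_cons] at h
        rcases h with h | h
        · left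
          cases h
          exact ⟨ds, rfl⟩
        · right; exact ih.mpr (by simpa using h)

-- adjacent-pair membership in the zip, indexed as A's loop indexes it
theorem pair_mem_zip_iff (cs : List Char) (p : Char × Char) :
    p ∈ cs.zip cs.tail ↔ ∃ j, 1 ≤ j ∧ j < cs.length ∧ (cs.getD (j - 1) ' ', cs.getD j ' ') = p := by
  constructor
  · intro h
    obtain ⟨k, hk, hget⟩ := List.getElem_of_mem h
    have hk' := hk
    rw [List.length_zip] at hk'
    have hk2 : k + 1 < cs.length := by
      rcases cs with _ | ⟨c, cs⟩ <;> simp_all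
    refine ⟨k + 1, by omega, hk2, ?_⟩
    rw [List.getElem_zip] at hget
    have hkt : k < cs.tail.length := by
      rcases cs with _ | ⟨c, cs⟩ <;> simp_all
    have h1 : cs.getD (k + 1 - 1) ' ' = cs[k]'(by omega) := by
      simp [List.getD_eq_getElem?_getD, List.getElem?_eq_getElem (by omega : k < cs.length)]
    have h2 : cs.getD (k + 1) ' ' = cs.tail[k]'hkt := by
      rcases cs with _ | ⟨c, cs⟩
      · simp at hk2
      · simp only [List.tail_cons] at hkt ⊢
        simp [List.getD_eq_getElem?_getD, List.getElem?_eq_getElem hkt]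
    rw [h1, h2, hget]
  · rintro ⟨j, hj1, hj2, rfl⟩
    have hjt : j - 1 < cs.tail.length := by
      rcases cs with _ | ⟨c, cs⟩ <;> simp_all <;> omega
    have h1 : cs.getD (j - 1) ' ' = cs[j - 1]'(by omega) := by
      simp [List.getD_eq_getElem?_getD, List.getElem?_eq_getElem (by omega : j - 1 < cs.length)]
    have h2 : cs.getD j ' ' = cs.tail[j - 1]'hjt := by
      rcases cs with _ | ⟨c, cs⟩
      · simp at hj2
      · simp only [List.tail_cons] at hjt ⊢
        have hj : j = (j - 1) + 1 := by omega
        rw [List.getD_eq_getElem?_getD]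
        conv_lhs => rw [hj]
        simp [List.getElem?_eq_getElem hjt]
    rw [h1, h2]
    have hlt : j - 1 < (cs.zip cs.tail).length := by rw [List.length_zip]; omega
    have := List.getElem_zip (i := j - 1) (h := hlt)
    exact this ▸ List.getElem_mem hlt

-- substring test of a two-char pattern, in A's loop-index terms
theorem isIn_pair (a b : Char) (p : String) (hp : p.toList = [a, b]) (s : String) :
    PySem.Str.isIn p s = true ↔
      ∃ j, 1 ≤ j ∧ j < s.toList.length ∧ (s.toList.getD (j - 1) ' ', s.toList.getD j ' ') = (a, b) := by
  rw [PySem.Str.isIn_iff_infix, hp, infix_pair_iff_mem_zip, pair_mem_zip_iff]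

-- characterisation of A's still-true loop run: no forbidden adjacent pair from index i on
theorem thirdLoopA_spec (cs : List Char) (i : Nat) :
    thirdLoopA cs i true =
      decide (∀ j, i ≤ j → j < cs.length → (cs.getD (j - 1) ' ', cs.getD j ' ') ∉ pvForbidden) := by
  induction hlen : cs.length - i using Nat.strong_induction_on generalizing i with
  | _ n ih =>
  rw [thirdLoopA]
  by_cases hlt : i < cs.length
  · rw [if_pos ⟨hlt, rfl⟩]
    by_cases hmem : (cs.getD (i - 1) ' ', cs.getD i ' ') ∈ pvForbidden
    · rw [if_pos hmem]
      have hfalse : thirdLoopA cs (i + 1) false = false := by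
        rw [thirdLoopA]; simp
      rw [hfalse]
      symm
      simp only [decide_eq_false_iff_not]
      intro h
      exact h i le_rfl hlt hmem
    · rw [if_neg hmem]
      rw [ih (cs.length - (i + 1)) (by omega) (i + 1) rfl]
      rcases Bool.eq_false_or_eq_true (decide (∀ j, i + 1 ≤ j → j < cs.length → (cs.getD (j - 1) ' ', cs.getD j ' ') ∉ pvForbidden)) with h | h
      · rw [h]; symm
        refine decide_eq_true ?_
        intro j hij hj
        rcases Nat.eq_or_lt_of_le hij with rfl | hlt'
        · exact hmem
        · exact (of_decide_eq_true h) j hlt' hj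
      · rw [h]; symm
        exact decide_eq_false (fun hall => (of_decide_eq_false h) (fun j hij hj => hall j (by omega) hj))
  · rw [if_neg (by simp [hlt])]
    symm
    simp only [decide_eq_true_eq]
    intro j hij hj
    omega

-- B's four substring tests, together, in A's loop-index terms
theorem any_isIn_iff (s : String) :
    (["ab", "cd", "pq", "xy"].any (fun p => PySem.Str.isIn p s) = true) ↔
      ∃ j, 1 ≤ j ∧ j < s.toList.length ∧
        (s.toList.getD (j - 1) ' ', s.toList.getD j ' ') ∈ pvForbidden := by
  constructor
  · intro h
    obtain ⟨p, hp, hin⟩ := List.any_eq_true.mp h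
    fin_cases hp
    · obtain ⟨j, h1, h2, he⟩ := (isIn_pair 'a' 'b' "ab" (by decide) s).mp hin
      exact ⟨j, h1, h2, by rw [he]; decide⟩
    · obtain ⟨j, h1, h2, he⟩ := (isIn_pair 'c' 'd' "cd" (by decide) s).mp hin
      exact ⟨j, h1, h2, by rw [he]; decide⟩
    · obtain ⟨j, h1, h2, he⟩ := (isIn_pair 'p' 'q' "pq" (by decide) s).mp hin
      exact ⟨j, h1, h2, by rw [he]; decide⟩
    · obtain ⟨j, h1, h2, he⟩ := (isIn_pair 'x' 'y' "xy" (by decide) s).mp hin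
      exact ⟨j, h1, h2, by rw [he]; decide⟩
  · rintro ⟨j, h1, h2, hmem⟩
    simp only [pvForbidden, List.mem_cons, List.not_mem_nil, or_false] at hmem
    rcases hmem with h | h | h | h
    · exact List.any_eq_true.mpr ⟨"ab", by simp, (isIn_pair 'a' 'b' "ab" (by decide) s).mpr ⟨j, h1, h2, h⟩⟩
    · exact List.any_eq_true.mpr ⟨"cd", by simp, (isIn_pair 'c' 'd' "cd" (by decide) s).mpr ⟨j, h1, h2, h⟩⟩
    · exact List.any_eq_true.mpr ⟨"pq", by simp, (isIn_pair 'p' 'q' "pq" (by decide) s).mpr ⟨j, h1, h2, h⟩⟩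
    · exact List.any_eq_true.mpr ⟨"xy", by simp, (isIn_pair 'x' 'y' "xy" (by decide) s).mpr ⟨j, h1, h2, h⟩⟩

-- ===== VERDICT (by name: the statement is the Claim_ definition above) =====
theorem thirdCondition_spec : Claim_equal_thirdCondition := by
  intro s _
  unfold Spec_thirdCondition thirdCondition thirdCondition_alt
  by_cases hshort : s = "" ∨ s.toList.length < 2
  · rw [if_pos hshort]
    have hlen : s.toList.length < 2 := by
      rcases hshort with rfl | h
      · simp
      · exact h
    have hd : decide (PySem.Str.len s ≥ 2) = false := by
      apply decide_eq_false
      rw [PySem.Str.len_eq]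
      intro hge
      omega
    rw [hd, Bool.false_and]
  · rw [if_neg hshort]
    push_neg at hshort
    have hlen : 2 ≤ s.toList.length := by omega
    have hd : decide (PySem.Str.len s ≥ 2) = true := by
      apply decide_eq_true
      rw [PySem.Str.len_eq]
      exact_mod_cast hlen
    rw [hd, Bool.true_and, thirdLoopA_spec]
    rcases Bool.eq_false_or_eq_true (["ab", "cd", "pq", "xy"].any (fun p => PySem.Str.isIn p s)) with h | h
    · rw [h, Bool.not_true]
      refine decide_eq_false ?_
      intro hall
      obtain ⟨j, h1, h2, hm⟩ := (any_isIn_iff s).mp h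
      exact hall j h1 h2 hm
    · rw [h, Bool.not_false]
      refine decide_eq_true ?_
      intro j hj1 hj2 hmem
      exact absurd ((any_isIn_iff s).mpr ⟨j, hj1, hj2, hmem⟩) (by rw [h]; decide)
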